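-- pv_equiv track=rewrite | github.com/Neterukun1993/Library | NumberTheory/Convolution/xor_convolve.py | xor_convolve
-- ===== SOURCE A (Python) =====
-- MOD = 998244353
--
-- def _wht(a, h):
--     for k in range(h):
--         bit = 1 << k
--         for i in range(1 << h):
--             if i & bit == 0:
--                 x, y = a[i], a[i | bit]
--                 a[i] = (x + y) % MOD
--                 a[i | bit] = (x - y) % MOD
--
-- def _iwht(a, h):
--     _wht(a, h)
--     invn = pow(1 << h, MOD - 2, MOD)
--     for i in range(1 << h):
--         a[i] *= invn
--         a[i] %= MOD
--
-- def xor_convolve(a, b):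
--     n = 1 << (max(len(a), len(b)) - 1).bit_length()
--     h = n.bit_length() - 1
--     a = list(a) + [0] * (n - len(a))
--     b = list(b) + [0] * (n - len(b))
--
--     _wht(a, h), _wht(b, h)
--     a = [(va * vb) % MOD for va, vb in zip(a, b)]
--     _iwht(a, h)
--     return a
-- ===== SOURCE B (Python) =====
-- MOD = 998244353
--
-- def _rwht(a):
--     # recursive Walsh-Hadamard transform (divide and conquer on top bit)
--     n = len(a)
--     if n <= 1:
--         return a
--     m = n // 2
--     u = _rwht(a[:m])
--     v = _rwht(a[m:])
--     return [(x + y) % MOD for x, y in zip(u, v)] + [(x - y) % MOD for x, y in zip(u, v)]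
--
-- def xor_convolve(a, b):
--     n = 1 << (max(len(a), len(b)) - 1).bit_length()
--     fa = _rwht(list(a) + [0] * (n - len(a)))
--     fb = _rwht(list(b) + [0] * (n - len(b)))
--     c = _rwht([(x * y) % MOD for x, y in zip(fa, fb)])
--     inv = pow(n, MOD - 2, MOD)
--     return [x * inv % MOD for x in c]
-- ===== Notes on version B (the rewrite author's own statement) =====
-- stated objective: alternative
-- what changed: The in-place iterative Walsh-Hadamard transform (double loop over bit masks mutating one array) is replaced by a recursive divide-and-conquer transform that splits the array in halves, recurses, and rebuilds sums/differences; the inverse transform becomes forward transform plus a final scaling map.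
import Mathlib
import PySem

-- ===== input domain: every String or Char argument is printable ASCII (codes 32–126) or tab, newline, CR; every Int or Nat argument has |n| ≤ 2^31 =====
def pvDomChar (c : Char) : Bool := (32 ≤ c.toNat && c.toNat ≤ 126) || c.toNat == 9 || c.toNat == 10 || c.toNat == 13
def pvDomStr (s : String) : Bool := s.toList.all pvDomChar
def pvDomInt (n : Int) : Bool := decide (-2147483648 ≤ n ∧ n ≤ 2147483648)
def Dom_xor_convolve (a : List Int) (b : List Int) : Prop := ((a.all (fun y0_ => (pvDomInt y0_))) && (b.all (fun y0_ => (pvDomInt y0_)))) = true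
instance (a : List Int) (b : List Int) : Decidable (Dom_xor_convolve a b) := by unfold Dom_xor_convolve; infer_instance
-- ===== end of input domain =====

-- B replaces A's iterative in-place bit-mask Walsh–Hadamard loops by a recursive
-- divide-and-conquer transform (split in halves, recurse, rebuild from sums/differences);
-- objective: alternative decomposition, same asymptotic cost.

-- shared constants / Python built-ins used by both sources
def pvMOD : Int := 998244353

-- Python's int.bit_length on a nonnegative value
def pvBitLen : Nat → Nat
  | 0 => 0
  | n + 1 => pvBitLen ((n + 1) / 2) + 1

-- Python's three-argument pow (square-and-multiply), positive modulus
def pvPow (b : Int) (e : Nat) (m : Int) : Int :=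
  if e = 0 then PySem.Int.mod 1 m
  else
    let r := pvPow b (e / 2) m
    let r2 := PySem.Int.mod (r * r) m
    if e % 2 = 1 then PySem.Int.mod (r2 * b) m else r2
decreasing_by exact Nat.div_lt_self (Nat.pos_of_ne_zero (by assumption)) (by norm_num)

-- ===== PORT A =====
-- body of the inner `if i & bit == 0` of _wht
def whtStep (bit : Nat) (a : List Int) (i : Nat) : List Int :=
  if i &&& bit = 0 then
    (a.set i (PySem.Int.mod (a.getD i 0 + a.getD (i ||| bit) 0) pvMOD)).set (i ||| bit)
      (PySem.Int.mod (a.getD i 0 - a.getD (i ||| bit) 0) pvMOD)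
  else a

-- the inner `for i in range(1 << h)` loop of _wht
def whtLayer (h : Nat) (a : List Int) (k : Nat) : List Int :=
  (List.range (2 ^ h)).foldl (whtStep (2 ^ k)) a

-- _wht: `for k in range(h)` (state threaded instead of mutated in place)
def whtA (a : List Int) (h : Nat) : List Int :=
  (List.range h).foldl (whtLayer h) a

-- _iwht
def iwhtA (a : List Int) (h : Nat) : List Int :=
  let a := whtA a h
  let invn := pvPow (2 ^ h) 998244351 pvMOD
  (List.range (2 ^ h)).foldl (fun a i => a.set i (PySem.Int.mod (a.getD i 0 * invn) pvMOD)) a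

def xor_convolve (a : List Int) (b : List Int) : List Int :=
  let n := 2 ^ pvBitLen ((max a.length b.length : Int) - 1).natAbs
  let h := pvBitLen n - 1
  let pa := a ++ List.replicate (n - a.length) 0
  let pb := b ++ List.replicate (n - b.length) 0
  let fa := whtA pa h
  let fb := whtA pb h
  let c := (fa.zip fb).map (fun p => PySem.Int.mod (p.1 * p.2) pvMOD)
  iwhtA c h

-- ===== PORT B =====
-- recursive Walsh–Hadamard transform (_rwht in Source B)
def rwht (a : List Int) : List Int :=
  if h0 : a.length ≤ 1 then a
  else
    let m := a.length / 2
    let u := rwht (a.take m)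
    let v := rwht (a.drop m)
    (List.zipWith (fun x y => PySem.Int.mod (x + y) pvMOD) u v) ++
    (List.zipWith (fun x y => PySem.Int.mod (x - y) pvMOD) u v)
termination_by a.length
decreasing_by
  · simp only [List.length_take]
    omega
  · simp only [List.length_drop]
    omega

def xor_convolve_alt (a : List Int) (b : List Int) : List Int :=
  let n := 2 ^ pvBitLen ((max a.length b.length : Int) - 1).natAbs
  let fa := rwht (a ++ List.replicate (n - a.length) 0)
  let fb := rwht (b ++ List.replicate (n - b.length) 0)
  let c := rwht (List.zipWith (fun x y => PySem.Int.mod (x * y) pvMOD) fa fb)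
  let inv := pvPow n 998244351 pvMOD
  c.map (fun x => PySem.Int.mod (x * inv) pvMOD)

-- ===== PRECONDITION & SPEC =====
def Spec_xor_convolve (a : List Int) (b : List Int) (out : List Int) : Prop := out = xor_convolve_alt a b
instance (a : List Int) (b : List Int) (out : List Int) : Decidable (Spec_xor_convolve a b out) := by unfold Spec_xor_convolve; infer_instance

-- ===== CLAIM (what is proved, stated in full; the proofs are below) =====
def Claim_equal_xor_convolve : Prop := ∀ (a : List Int) (b : List Int), Dom_xor_convolve a b → Spec_xor_convolve a b (xor_convolve a b)

-- ===== LEMMAS AND PROOFS =====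

-- bit arithmetic helpers
theorem pv_and_two_pow_eq_zero {i n : Nat} (h : i < 2 ^ n) : i &&& 2 ^ n = 0 := by
  rw [Nat.and_two_pow]; simp [Nat.testBit_lt_two_pow h]

theorem pv_two_pow_add_eq_or {i n : Nat} (h : i < 2 ^ n) : 2 ^ n + i = 2 ^ n ||| i := by
  have := Nat.two_pow_add_eq_or_of_lt h 1; simpa using this

theorem pv_or_two_pow_eq_add {i n : Nat} (h : i < 2 ^ n) : i ||| 2 ^ n = 2 ^ n + i := by
  rw [Nat.lor_comm, ← pv_two_pow_add_eq_or h]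

theorem pv_two_pow_and_two_pow {h k : Nat} (hk : k ≠ h) : (2 ^ h : Nat) &&& 2 ^ k = 0 := by
  rw [Nat.and_two_pow]; simp only [Nat.testBit_two_pow]
  simp [Ne.symm hk]

theorem pv_shift_and {j h k : Nat} (hj : j < 2 ^ h) (hk : k < h) :
    (2 ^ h + j) &&& 2 ^ k = j &&& 2 ^ k := by
  rw [pv_two_pow_add_eq_or hj, Nat.and_or_distrib_right,
    pv_two_pow_and_two_pow (Nat.ne_of_lt hk), Nat.zero_or]

theorem pv_shift_or {j h k : Nat} (hj : j < 2 ^ h) (hk : k < h) :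
    (2 ^ h + j) ||| 2 ^ k = 2 ^ h + (j ||| 2 ^ k) := by
  have hlt : j ||| 2 ^ k < 2 ^ h :=
    Nat.or_lt_two_pow hj (Nat.pow_lt_pow_right (by norm_num) hk)
  rw [pv_two_pow_add_eq_or hj, Nat.lor_assoc, ← pv_two_pow_add_eq_or hlt]

-- list access helpers at an exact offset
theorem pv_getD_len (pre : List Int) (x : Int) (l : List Int) :
    (pre ++ x :: l).getD pre.length 0 = x := by
  induction pre with
  | nil => rfl
  | cons p ps ih => simpa using ih

theorem pv_set_len (pre : List Int) (x y : Int) (l : List Int) :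
    (pre ++ x :: l).set pre.length y = pre ++ y :: l := by
  induction pre with
  | nil => rfl
  | cons p ps ih => simpa using ih

theorem pv_getD_add (pre : List Int) (l : List Int) (j : Nat) :
    (pre ++ l).getD (pre.length + j) 0 = l.getD j 0 := by
  induction pre with
  | nil => simp
  | cons p ps ih => simpa [Nat.succ_add] using ih

theorem pv_set_add (pre : List Int) (l : List Int) (j : Nat) (y : Int) :
    (pre ++ l).set (pre.length + j) y = pre ++ l.set j y := by
  induction pre with
  | nil => simp
  | cons p ps ih => simpa [Nat.succ_add] using ih

-- whtStep basic facts
theorem whtStep_length (bit : Nat) (a : List Int) (i : Nat) :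
    (whtStep bit a i).length = a.length := by
  unfold whtStep; split <;> simp

theorem pv_foldl_length (bit : Nat) :
    ∀ (l : List Nat) (a : List Int), (l.foldl (whtStep bit) a).length = a.length := by
  intro l
  induction l with
  | nil => intro a; rfl
  | cons i l ih => intro a; simpa [whtStep_length] using ih (whtStep bit a i)

theorem whtLayer_length (h : Nat) (a : List Int) (k : Nat) :
    (whtLayer h a k).length = a.length := pv_foldl_length _ _ a

theorem whtA_length (a : List Int) (h : Nat) : (whtA a h).length = a.length := by
  unfold whtA
  induction List.range h generalizing a with
  | nil => rfl
  | cons k l ih => simpa [whtLayer_length] using ih (whtLayer h a k)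

-- a step on the first half only touches the first half
theorem whtStep_left {h k : Nat} (hk : k < h) (u v : List Int) (hu : u.length = 2 ^ h)
    (i : Nat) (hi : i < 2 ^ h) :
    whtStep (2 ^ k) (u ++ v) i = whtStep (2 ^ k) u i ++ v := by
  have hbit : (2 : Nat) ^ k < 2 ^ h := Nat.pow_lt_pow_right (by norm_num) hk
  have hor : i ||| 2 ^ k < 2 ^ h := Nat.or_lt_two_pow hi hbit
  unfold whtStep
  split
  · have g1 : (u ++ v).getD i 0 = u.getD i 0 := List.getD_append _ _ _ _ (by omega)
    have g2 : (u ++ v).getD (i ||| 2 ^ k) 0 = u.getD (i ||| 2 ^ k) 0 :=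
      List.getD_append _ _ _ _ (by omega)
    have s1 : ∀ x : Int, (u ++ v).set i x = u.set i x ++ v :=
      fun x => List.set_append_left i x (by omega)
    have s2 : ∀ (x y : Int), (u.set i x ++ v).set (i ||| 2 ^ k) y =
        (u.set i x).set (i ||| 2 ^ k) y ++ v :=
      fun x y => List.set_append_left _ y (by simpa using (by omega : i ||| 2 ^ k < u.length))
    simp only [g1, g2, s1, s2]
  · rfl

-- a step shifted by 2^h only touches the second half
theorem whtStep_right {h k : Nat} (hk : k < h) (u v : List Int) (hu : u.length = 2 ^ h)
    (j : Nat) (hj : j < 2 ^ h) :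
    whtStep (2 ^ k) (u ++ v) (2 ^ h + j) = u ++ whtStep (2 ^ k) v j := by
  have hbit : (2 : Nat) ^ k < 2 ^ h := Nat.pow_lt_pow_right (by norm_num) hk
  have hor : j ||| 2 ^ k < 2 ^ h := Nat.or_lt_two_pow hj hbit
  unfold whtStep
  rw [pv_shift_and hj hk]
  split
  · have g1 : (u ++ v).getD (2 ^ h + j) 0 = v.getD j 0 := by
      rw [show 2 ^ h + j = u.length + j by omega]; exact pv_getD_add u v j
    have g2 : (u ++ v).getD ((2 ^ h + j) ||| 2 ^ k) 0 = v.getD (j ||| 2 ^ k) 0 := by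
      rw [pv_shift_or hj hk, show 2 ^ h + (j ||| 2 ^ k) = u.length + (j ||| 2 ^ k) by omega]
      exact pv_getD_add u v _
    have s1 : ∀ x : Int, (u ++ v).set (2 ^ h + j) x = u ++ v.set j x := by
      intro x
      rw [show 2 ^ h + j = u.length + j by omega]; exact pv_set_add u v j x
    have s2 : ∀ (x y : Int), (u ++ v.set j x).set ((2 ^ h + j) ||| 2 ^ k) y =
        u ++ (v.set j x).set (j ||| 2 ^ k) y := by
      intro x y
      rw [pv_shift_or hj hk, show 2 ^ h + (j ||| 2 ^ k) = u.length + (j ||| 2 ^ k) by omega]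
      exact pv_set_add u _ _ y
    simp only [g1, g2, s1, s2]
  · rfl

-- first-half fold
theorem pv_fold_left {h k : Nat} (hk : k < h) :
    ∀ (l : List Nat), (∀ i ∈ l, i < 2 ^ h) → ∀ (u v : List Int), u.length = 2 ^ h →
    l.foldl (whtStep (2 ^ k)) (u ++ v) = l.foldl (whtStep (2 ^ k)) u ++ v := by
  intro l
  induction l with
  | nil => intro _ u v _; rfl
  | cons i l ih =>
    intro hmem u v hu
    simp only [List.foldl_cons]
    rw [whtStep_left hk u v hu i (hmem i (by simp))]
    exact ih (fun j hj => hmem j (by simp [hj])) _ v (by rw [whtStep_length]; exact hu)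

-- second-half fold (indices shifted by 2^h)
theorem pv_fold_right {h k : Nat} (hk : k < h) :
    ∀ (l : List Nat), (∀ j ∈ l, j < 2 ^ h) → ∀ (u v : List Int), u.length = 2 ^ h →
    (l.map (2 ^ h + ·)).foldl (whtStep (2 ^ k)) (u ++ v) = u ++ l.foldl (whtStep (2 ^ k)) v := by
  intro l
  induction l with
  | nil => intro _ u v _; rfl
  | cons j l ih =>
    intro hmem u v hu
    simp only [List.map_cons, List.foldl_cons]
    rw [whtStep_right hk u v hu j (hmem j (by simp))]
    exact ih (fun i hi => hmem i (by simp [hi])) u _ hu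

-- a full layer k < h on an array of length 2^(h+1) splits into the two halves
theorem whtLayer_split {h k : Nat} (hk : k < h) (u v : List Int)
    (hu : u.length = 2 ^ h) (hv : v.length = 2 ^ h) :
    whtLayer (h + 1) (u ++ v) k = whtLayer h u k ++ whtLayer h v k := by
  unfold whtLayer
  have hsplit : List.range (2 ^ (h + 1)) =
      List.range (2 ^ h) ++ (List.range (2 ^ h)).map (2 ^ h + ·) := by
    rw [show (2 : Nat) ^ (h + 1) = 2 ^ h + 2 ^ h by ring, List.range_add]
  rw [hsplit, List.foldl_append,
    pv_fold_left hk _ (fun i hi => List.mem_range.mp hi) u v hu,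
    pv_fold_right hk _ (fun j hj => List.mem_range.mp hj) _ v
      (by rw [pv_foldl_length]; exact hu)]

-- top layer: the butterfly with bit = 2^h combines the two halves pointwise
theorem pv_top_fold (h : Nat) :
    ∀ (u2 v2 w1 w2 : List Int), w1.length = w2.length → u2.length = v2.length →
    w1.length + u2.length = 2 ^ h →
    (List.range' w1.length u2.length).foldl (whtStep (2 ^ h)) ((w1 ++ u2) ++ (w2 ++ v2)) =
      (w1 ++ List.zipWith (fun x y => PySem.Int.mod (x + y) pvMOD) u2 v2) ++
      (w2 ++ List.zipWith (fun x y => PySem.Int.mod (x - y) pvMOD) u2 v2) := by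
  intro u2
  induction u2 with
  | nil =>
    intro v2 w1 w2 hw hl _
    have : v2 = [] := List.eq_nil_of_length_eq_zero (by simpa using hl.symm)
    subst this; simp
  | cons x u2 ih =>
    intro v2 w1 w2 hw hl hs
    obtain ⟨y, v2, rfl⟩ : ∃ y v2', v2 = y :: v2' := by
      cases v2 with
      | nil => simp at hl
      | cons y v2' => exact ⟨y, v2', rfl⟩
    have hslt : w1.length < 2 ^ h := by simp at hs; omega
    have hfirstlen : (w1 ++ x :: u2).length = 2 ^ h := by simpa using hs
    simp only [List.length_cons, List.range'_succ, List.foldl_cons]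
    have hstep : whtStep (2 ^ h) ((w1 ++ x :: u2) ++ (w2 ++ y :: v2)) w1.length =
        ((w1 ++ [PySem.Int.mod (x + y) pvMOD]) ++ u2) ++
        ((w2 ++ [PySem.Int.mod (x - y) pvMOD]) ++ v2) := by
      unfold whtStep
      rw [if_pos (pv_and_two_pow_eq_zero hslt)]
      have g1 : ((w1 ++ x :: u2) ++ (w2 ++ y :: v2)).getD w1.length 0 = x := by
        rw [List.getD_append _ _ _ _ (by simp), pv_getD_len]
      have g2 : ((w1 ++ x :: u2) ++ (w2 ++ y :: v2)).getD (w1.length ||| 2 ^ h) 0 = y := by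
        rw [pv_or_two_pow_eq_add hslt, show 2 ^ h + w1.length = (w1 ++ x :: u2).length + w1.length
          by simp at hs ⊢; omega, pv_getD_add, hw, pv_getD_len]
      rw [g1, g2,
        List.set_append_left _ _ (by simp), pv_set_len,
        pv_or_two_pow_eq_add hslt,
        show 2 ^ h + w1.length = (w1 ++ PySem.Int.mod (x + y) pvMOD :: u2).length + w1.length
          by simp at hs ⊢; omega,
        pv_set_add, hw, pv_set_len]
      simp
    rw [hstep]
    have := ih v2 (w1 ++ [PySem.Int.mod (x + y) pvMOD]) (w2 ++ [PySem.Int.mod (x - y) pvMOD])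
      (by simp [hw]) (by simpa using hl) (by simp at hs ⊢; omega)
    simp only [List.length_append, List.length_cons, List.length_nil] at this ⊢
    rw [show w1.length + 1 = w1.length + [PySem.Int.mod (x + y) pvMOD].length by simp] at *
    rw [this]
    simp

theorem pv_top_noop (h : Nat) (j : Nat) (hj : j < 2 ^ h) (a : List Int) :
    whtStep (2 ^ h) a (2 ^ h + j) = a := by
  unfold whtStep
  rw [if_neg]
  rw [pv_two_pow_add_eq_or hj, Nat.and_or_distrib_right, Nat.and_self,
    pv_and_two_pow_eq_zero hj, Nat.or_zero]
  positivity

theorem whtLayer_top (h : Nat) (u v : List Int) (hu : u.length = 2 ^ h) (hv : v.length = 2 ^ h) :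
    whtLayer (h + 1) (u ++ v) h =
      (List.zipWith (fun x y => PySem.Int.mod (x + y) pvMOD) u v) ++
      (List.zipWith (fun x y => PySem.Int.mod (x - y) pvMOD) u v) := by
  unfold whtLayer
  rw [show (2 : Nat) ^ (h + 1) = 2 ^ h + 2 ^ h by ring, List.range_add, List.foldl_append]
  have h1 : (List.range (2 ^ h)).foldl (whtStep (2 ^ h)) (u ++ v) =
      (List.zipWith (fun x y => PySem.Int.mod (x + y) pvMOD) u v) ++
      (List.zipWith (fun x y => PySem.Int.mod (x - y) pvMOD) u v) := by
    have := pv_top_fold h u v [] [] rfl (by omega) (by simpa using hu)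
    simpa [List.range_eq_range', hu] using this
  rw [h1]
  have : ∀ (l : List Nat), (∀ j ∈ l, j < 2 ^ h) → ∀ (a : List Int),
      (l.map (2 ^ h + ·)).foldl (whtStep (2 ^ h)) a = a := by
    intro l
    induction l with
    | nil => intro _ a; rfl
    | cons j l ih =>
      intro hmem a
      simp only [List.map_cons, List.foldl_cons]
      rw [pv_top_noop h j (hmem j (by simp))]
      exact ih (fun i hi => hmem i (by simp [hi])) a
  exact this _ (fun j hj => List.mem_range.mp hj) _

-- the iterative transform equals the recursive one on arrays of length 2^h
theorem pv_prefix_split (h : Nat) :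
    ∀ (l : List Nat), (∀ k ∈ l, k < h) → ∀ (u v : List Int),
    u.length = 2 ^ h → v.length = 2 ^ h →
    l.foldl (whtLayer (h + 1)) (u ++ v) = l.foldl (whtLayer h) u ++ l.foldl (whtLayer h) v := by
  intro l
  induction l with
  | nil => intro _ u v _ _; rfl
  | cons k l ih =>
    intro hmem u v hu hv
    simp only [List.foldl_cons]
    rw [whtLayer_split (hmem k (by simp)) u v hu hv]
    exact ih (fun j hj => hmem j (by simp [hj])) _ _
      (by rw [whtLayer_length]; exact hu) (by rw [whtLayer_length]; exact hv)

theorem whtA_eq_rwht : ∀ (h : Nat) (a : List Int), a.length = 2 ^ h → whtA a h = rwht a := by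
  intro h
  induction h with
  | zero =>
    intro a ha
    rw [whtA, List.range_zero, List.foldl_nil, rwht, dif_pos (by omega)]
  | succ h ih =>
    intro a ha
    have hlen : (2 : Nat) ^ h ≤ a.length := by rw [ha, pow_succ]; omega
    have hu : (a.take (2 ^ h)).length = 2 ^ h := by simp [List.length_take]; omega
    have hv : (a.drop (2 ^ h)).length = 2 ^ h := by simp [List.length_drop]; rw [ha]; ring_nf; omega
    have hsplit : a = a.take (2 ^ h) ++ a.drop (2 ^ h) := (List.take_append_drop _ a).symm
    have hm : a.length / 2 = 2 ^ h := by rw [ha, pow_succ]; omega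
    rw [whtA, List.range_succ, List.foldl_append, List.foldl_cons, List.foldl_nil]
    conv_lhs => rw [hsplit]
    rw [pv_prefix_split h _ (fun k hk => List.mem_range.mp hk) _ _ hu hv]
    have hAu : (List.range h).foldl (whtLayer h) (a.take (2 ^ h)) = whtA (a.take (2 ^ h)) h := rfl
    have hAv : (List.range h).foldl (whtLayer h) (a.drop (2 ^ h)) = whtA (a.drop (2 ^ h)) h := rfl
    rw [hAu, hAv, whtLayer_top h _ _ (by rw [whtA_length]; exact hu) (by rw [whtA_length]; exact hv)]
    rw [ih _ hu, ih _ hv]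
    have hcond : ¬ a.length ≤ 1 := by
      rw [ha]; have := Nat.one_lt_two_pow_iff.mpr (by omega : h + 1 ≠ 0); omega
    conv_rhs => rw [rwht]
    rw [dif_neg hcond]
    simp only [hm]

theorem pv_lt_two_pow_bitLen (k : Nat) : k < 2 ^ pvBitLen k := by
  induction k using Nat.strong_induction_on with
  | _ k ih =>
    match k with
    | 0 => norm_num [pvBitLen]
    | k + 1 =>
      have hd : (k + 1) / 2 < k + 1 := Nat.div_lt_self (by omega) (by norm_num)
      have := ih ((k + 1) / 2) hd
      have heq : pvBitLen (k + 1) = pvBitLen ((k + 1) / 2) + 1 := by rw [pvBitLen]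
      rw [heq, pow_succ]
      omega

theorem pv_max_le (m : Nat) : m ≤ 2 ^ pvBitLen ((m : Int) - 1).natAbs := by
  cases m with
  | zero => exact Nat.zero_le _
  | succ m =>
    have h1 : ((m + 1 : Nat) : Int) - 1 = (m : Int) := by push_cast; ring
    rw [h1, Int.natAbs_natCast]
    exact pv_lt_two_pow_bitLen m

theorem pv_zip_map (f : Int → Int → Int) : ∀ (l l' : List Int),
    (l.zip l').map (fun p => f p.1 p.2) = List.zipWith f l l' := by
  intro l
  induction l with
  | nil => intro l'; rfl
  | cons x l ih =>
    intro l'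
    cases l' with
    | nil => rfl
    | cons y l' => simpa using ih l'

-- scaling loop = map
theorem pv_scale_fold (f : Int → Int) :
    ∀ (l pre : List Int),
    (List.range' pre.length l.length).foldl (fun a i => a.set i (f (a.getD i 0))) (pre ++ l) =
      pre ++ l.map f := by
  intro l
  induction l with
  | nil => intro pre; simp
  | cons x l ih =>
    intro pre
    simp only [List.length_cons, List.range'_succ, List.foldl_cons]
    rw [pv_getD_len, pv_set_len]
    have := ih (pre ++ [f x])
    simpa [List.append_assoc] using this

theorem pvBitLen_two_pow (e : Nat) : pvBitLen (2 ^ e) = e + 1 := by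
  induction e with
  | zero => norm_num [pvBitLen]
  | succ e ih =>
    have hpos : 0 < 2 ^ (e + 1) := Nat.pow_pos (by norm_num)
    rw [show (2 : Nat) ^ (e + 1) = (2 ^ (e + 1) - 1) + 1 by omega]
    unfold pvBitLen
    rw [show ((2 : Nat) ^ (e + 1) - 1 + 1) / 2 = 2 ^ e by omega]
    rw [ih]

-- ===== VERDICT (by name: the statement is the Claim_ definition above) =====
theorem xor_convolve_spec : Claim_equal_xor_convolve := by
  unfold Claim_equal_xor_convolve
  intro a b _
  simp only [Spec_xor_convolve, xor_convolve, xor_convolve_alt, iwhtA]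
  rw [show (max (a.length : Int) (b.length : Int)) = ((max a.length b.length : Nat) : Int) from
    (Nat.cast_max a.length b.length).symm]
  have hmaxle : max a.length b.length ≤ 2 ^ pvBitLen (((max a.length b.length : Nat) : Int) - 1).natAbs :=
    pv_max_le _
  set e := pvBitLen (((max a.length b.length : Nat) : Int) - 1).natAbs with he
  have hh : pvBitLen (2 ^ e) - 1 = e := by rw [pvBitLen_two_pow]; omega
  have hpa : (a ++ List.replicate (2 ^ e - a.length) 0).length = 2 ^ e := by
    simp; omega
  have hpb : (b ++ List.replicate (2 ^ e - b.length) 0).length = 2 ^ e := by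
    simp; omega
  have hrl : ∀ (x : List Int), x.length = 2 ^ e → (rwht x).length = 2 ^ e := by
    intro x hx
    rw [← whtA_eq_rwht e x hx, whtA_length, hx]
  rw [hh, whtA_eq_rwht e _ hpa, whtA_eq_rwht e _ hpb,
    pv_zip_map (fun x y => PySem.Int.mod (x * y) pvMOD)]
  have hc : (List.zipWith (fun x y => PySem.Int.mod (x * y) pvMOD)
      (rwht (a ++ List.replicate (2 ^ e - a.length) 0))
      (rwht (b ++ List.replicate (2 ^ e - b.length) 0))).length = 2 ^ e := by
    rw [List.length_zipWith, hrl _ hpa, hrl _ hpb, Nat.min_self]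
  rw [whtA_eq_rwht e _ hc]
  have hclen := hrl _ hc
  have hscale := pv_scale_fold
    (fun x => PySem.Int.mod (x * pvPow (((2 ^ e : Nat) : Int)) 998244351 pvMOD) pvMOD)
    (rwht (List.zipWith (fun x y => PySem.Int.mod (x * y) pvMOD)
      (rwht (a ++ List.replicate (2 ^ e - a.length) 0))
      (rwht (b ++ List.replicate (2 ^ e - b.length) 0)))) []
  simpa [List.range_eq_range', hclen] using hscale
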